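-- pv_equiv track=rewrite | github.com/stuartstein777/CodeWars | 6KYU/Simple Fun #52: Pair of Shoes/solution.py | pair_of_shoes
-- ===== SOURCE A (Python) =====
-- def pair_of_shoes(shoes):
--    leftRight = 0
--    Size = 0
--
--    for shoe in shoes:
--        if shoe[0] == 0:
--            leftRight = leftRight + 1
--            Size = Size + shoe[1]
--        else:
--            leftRight = leftRight - 1
--            Size = Size - shoe[1]
--
--    return leftRight == 0 and Size == 0
-- ===== SOURCE B (Python) =====
-- def pair_of_shoes(shoes):
--     lefts = [s for s in shoes if s[0] == 0]
--     rights = [s for s in shoes if s[0] != 0]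
--     return len(lefts) == len(rights) and sum(s[1] for s in lefts) == sum(s[1] for s in rights)
-- ===== Notes on version B (the rewrite author's own statement) =====
-- stated objective: simpler
-- what changed: Replaces the single signed accumulator loop with a partition into lefts/rights and two independent length and size-sum comparisons.
import Mathlib
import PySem

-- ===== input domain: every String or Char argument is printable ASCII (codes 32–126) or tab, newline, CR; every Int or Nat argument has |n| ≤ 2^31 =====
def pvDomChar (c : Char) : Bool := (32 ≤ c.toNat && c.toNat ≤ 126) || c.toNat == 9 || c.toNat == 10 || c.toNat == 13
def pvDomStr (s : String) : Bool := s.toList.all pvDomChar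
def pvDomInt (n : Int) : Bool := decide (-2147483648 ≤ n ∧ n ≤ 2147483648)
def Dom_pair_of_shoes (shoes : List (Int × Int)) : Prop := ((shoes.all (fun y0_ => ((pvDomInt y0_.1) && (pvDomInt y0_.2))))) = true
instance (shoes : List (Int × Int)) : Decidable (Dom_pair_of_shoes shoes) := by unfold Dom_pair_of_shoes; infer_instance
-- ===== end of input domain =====

-- B partitions the shoes by side and compares counts and size sums; objective: simpler decomposition.

-- ===== PORT A =====
-- literal port of A's loop: one pass with two signed accumulators (leftRight, Size)
def pair_of_shoes (shoes : List (Int × Int)) : Bool :=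
  let acc := shoes.foldl
    (fun (st : Int × Int) shoe =>
      if shoe.1 == 0 then (st.1 + 1, st.2 + shoe.2) else (st.1 - 1, st.2 - shoe.2))
    (0, 0)
  acc.1 == 0 && acc.2 == 0

-- ===== PORT B =====
def pair_of_shoes_alt (shoes : List (Int × Int)) : Bool :=
  let lefts := shoes.filter (fun s => s.1 == 0)
  let rights := shoes.filter (fun s => !(s.1 == 0))
  (lefts.length == rights.length)
    && ((lefts.map (fun s => s.2)).sum == (rights.map (fun s => s.2)).sum)

-- ===== PRECONDITION & SPEC =====
def Spec_pair_of_shoes (shoes : List (Int × Int)) (out : Bool) : Prop := out = pair_of_shoes_alt shoes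
instance (shoes : List (Int × Int)) (out : Bool) : Decidable (Spec_pair_of_shoes shoes out) := by unfold Spec_pair_of_shoes; infer_instance

-- ===== CLAIM (what is proved, stated in full; the proofs are below) =====
def Claim_equal_pair_of_shoes : Prop := ∀ (shoes : List (Int × Int)), Dom_pair_of_shoes shoes → Spec_pair_of_shoes shoes (pair_of_shoes shoes)

-- ===== LEMMAS AND PROOFS =====

-- loop invariant: A's accumulator pair equals (start + count difference, start + sum difference)
theorem pair_of_shoes_fold (shoes : List (Int × Int)) (a b : Int) :
    shoes.foldl
      (fun (st : Int × Int) shoe =>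
        if shoe.1 == 0 then (st.1 + 1, st.2 + shoe.2) else (st.1 - 1, st.2 - shoe.2))
      (a, b)
    = (a + ((shoes.filter (fun s => s.1 == 0)).length : Int)
         - ((shoes.filter (fun s => !(s.1 == 0))).length : Int),
       b + ((shoes.filter (fun s => s.1 == 0)).map (fun s => s.2)).sum
         - ((shoes.filter (fun s => !(s.1 == 0))).map (fun s => s.2)).sum) := by
  induction shoes generalizing a b with
  | nil => simp
  | cons x xs ih =>
    rw [List.foldl_cons, List.filter_cons, List.filter_cons]
    cases hx : (x.1 == 0) <;>
      simp only [hx, Bool.not_true, Bool.not_false, Bool.false_eq_true,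
        if_true, if_false, List.length_cons, List.map_cons, List.sum_cons] <;>
    · rw [ih]; refine Prod.ext ?_ ?_ <;> simp <;> push_cast <;> ring

-- ===== VERDICT (by name: the statement is the Claim_ definition above) =====
theorem pair_of_shoes_spec : Claim_equal_pair_of_shoes := by
  intro shoes _
  unfold Spec_pair_of_shoes pair_of_shoes pair_of_shoes_alt
  simp only [pair_of_shoes_fold]
  rw [Bool.eq_iff_iff]
  simp only [Bool.and_eq_true, beq_iff_eq]
  constructor
  · rintro ⟨h1, h2⟩
    exact ⟨by omega, by omega⟩
  · rintro ⟨h1, h2⟩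
    exact ⟨by omega, by omega⟩
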